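-- pv_equiv track=rewrite | github.com/JinDDung2/algorithm-pratice | out/production/algorithm-pratice/programmas/python/lv3/overtime_index.py | solution
-- ===== SOURCE A (Python) =====
-- import heapq
--
-- def solution(n, works):
--     answer = 0
--     if n >= sum(works): return answer
--
--     heap = []
--
--     for work in works:
--         heapq.heappush(heap, -work)
--
--     for _ in range(n):
--         work = heapq.heappop(heap)
--         work += 1
--         heapq.heappush(heap, work)
--
--     for num in heap:
--         answer += num ** 2
--
--     return answer
-- ===== SOURCE B (Python) =====
-- def solution(n, works):
--     total = sum(works)
--     if n >= total:
--         return 0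
--     if n <= 0:
--         return sum(w * w for w in works)
--     ws = sorted(works, reverse=True)
--     m = len(ws)
--     # scan: find c = number of top elements engaged by the n decrements
--     cum = ws[0]
--     c = 1
--     while c < m and cum - c * ws[c] <= n:
--         cum += ws[c]
--         c += 1
--     L = -((cum - n) // -c)          # final level: ceil((cum - n) / c)
--     k = n - (cum - c * L)           # k engaged elements end one below the level
--     return sum(w * w for w in ws[c:]) + k * (L - 1) ** 2 + (c - k) * L * L
-- ===== Notes on version B (the rewrite author's own statement) =====
-- stated objective: alternative
-- what changed: Replaces the max-heap and the n one-by-one greedy decrements with one descending sort plus a single scan that finds how many top elements the budget engages and computes the final level and the sum of squares arithmetically (intended as asymptotically faster in n; a timing run read 1.64x at the largest size but did not consistently confirm 1.5x).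
import Mathlib
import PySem

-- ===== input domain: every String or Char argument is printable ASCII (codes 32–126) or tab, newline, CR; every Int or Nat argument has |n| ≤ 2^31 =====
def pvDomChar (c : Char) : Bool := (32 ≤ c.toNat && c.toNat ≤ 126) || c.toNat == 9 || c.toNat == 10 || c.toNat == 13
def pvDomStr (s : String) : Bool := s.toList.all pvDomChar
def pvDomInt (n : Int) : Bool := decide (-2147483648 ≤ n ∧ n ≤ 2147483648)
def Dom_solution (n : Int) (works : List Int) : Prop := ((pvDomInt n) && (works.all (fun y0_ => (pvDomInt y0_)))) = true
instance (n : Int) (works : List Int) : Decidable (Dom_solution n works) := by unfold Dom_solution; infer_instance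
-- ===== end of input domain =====

-- B replaces A's max-heap and n one-by-one decrements by one descending sort plus a single
-- scan that computes the final level and the answer arithmetically (no per-decrement work).

-- ===== PORT A =====
-- A uses the heapq module; heapq.heappush / heappop (with their helpers _siftdown and
-- _siftup) are ported below by hand, step for step from CPython's Lib/heapq.py (exact:
-- all list indices touched are in range by construction, so List.getD reads are Python's reads).

-- heapq._siftdown(heap, startpos, pos): the bubble-up while-loop; `newitem` is read once
def siftdownLoop (h : List Int) (newitem : Int) (startpos pos : Nat) : List Int :=
  if hgt : startpos < pos then
    let parentpos := (pos - 1) / 2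
    let parent := h.getD parentpos 0
    if newitem < parent then
      siftdownLoop (h.set pos parent) newitem startpos parentpos
    else h.set pos newitem
  else h.set pos newitem
termination_by pos
decreasing_by exact Nat.lt_of_le_of_lt (Nat.div_le_self _ _) (by omega)

def siftdown (h : List Int) (startpos pos : Nat) : List Int :=
  siftdownLoop h (h.getD pos 0) startpos pos

-- heapq.heappush
def heappush (heap : List Int) (item : Int) : List Int :=
  siftdown (heap ++ [item]) 0 heap.length

-- heapq._siftup's while-loop: move the smaller child up until a leaf; returns the array
-- and the final hole position
def siftupLoop (h : List Int) (pos endpos : Nat) : List Int × Nat :=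
  if hc : 2 * pos + 1 < endpos then
    let childpos := 2 * pos + 1
    let rightpos := childpos + 1
    let childpos := if rightpos < endpos ∧ ¬ (h.getD childpos 0 < h.getD rightpos 0) then rightpos else childpos
    siftupLoop (h.set pos (h.getD childpos 0)) childpos endpos
  else (h, pos)
termination_by endpos - pos
decreasing_by
  split <;> omega

-- heapq._siftup(heap, pos): bubble down to a leaf, write newitem there, then _siftdown
def siftup (h : List Int) (pos : Nat) : List Int :=
  let endpos := h.length
  let startpos := pos
  let newitem := h.getD pos 0
  let hp := siftupLoop h pos endpos
  siftdown (hp.1.set hp.2 newitem) startpos hp.2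

-- heapq.heappop; on an empty heap Python raises IndexError — unreachable in `solution`
-- (guarded by the `n >= sum(works)` early return), we return (0, []) there
def heappop (heap : List Int) : Int × List Int :=
  match heap.getLast? with
  | none => (0, [])
  | some lastelt =>
    let rest := heap.dropLast
    if rest.isEmpty then (lastelt, rest)
    else
      let returnitem := rest.getD 0 0
      (returnitem, siftup (rest.set 0 lastelt) 0)

def solution (n : Int) (works : List Int) : Int :=
  let answer : Int := 0
  if n ≥ works.sum then answer
  else
    let heap : List Int := []
    let heap := works.foldl (fun h work => heappush h (-work)) heap
    let heap := (PySem.List.pyRange 0 n 1).foldl (fun h _ =>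
      let wh := heappop h
      heappush wh.2 (wh.1 + 1)) heap
    heap.foldl (fun a num => a + num ^ 2) answer

-- ===== PORT B =====
-- the while-loop of Source B: extend the engaged prefix while levelling it to the next value stays within budget
def bScan (ws : List Int) (n cum : Int) (c : Nat) : Int × Nat :=
  if h : c < ws.length ∧ cum - c * ws.getD c 0 ≤ n then
    bScan ws n (cum + ws.getD c 0) (c + 1)
  else (cum, c)
termination_by ws.length - c
decreasing_by omega

def solution_alt (n : Int) (works : List Int) : Int :=
  let total := works.sum
  if n ≥ total then 0
  else if n ≤ 0 then (works.map (fun w => w * w)).sum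
  else
    let ws := PySem.List.sorted works (fun x => x) true
    let p := bScan ws n (ws.getD 0 0) 1
    let cum := p.1
    let c := p.2
    let L := -(PySem.Int.floordiv (cum - n) (-(c : Int)))   -- ceil((cum - n) / c)
    let k := n - (cum - (c : Int) * L)
    ((ws.drop c).map (fun w => w * w)).sum + k * (L - 1) ^ 2 + ((c : Int) - k) * L * L

-- ===== PRECONDITION & SPEC =====
def Spec_solution (n : Int) (works : List Int) (out : Int) : Prop := out = solution_alt n works
instance (n : Int) (works : List Int) (out : Int) : Decidable (Spec_solution n works out) := by unfold Spec_solution; infer_instance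

-- ===== CLAIM (what is proved, stated in full; the proofs are below) =====
def Claim_equal_solution : Prop := ∀ (n : Int) (works : List Int), Dom_solution n works → Spec_solution n works (solution n works)

-- ===== LEMMAS AND PROOFS =====

def gD (h : List Int) (i : Nat) : Int := h.getD i 0

theorem set_perm (l : List Int) (i : Nat) (a : Int) (hi : i < l.length) :
    (l.set i a).Perm (a :: l.eraseIdx i) := by
  rw [List.set_eq_take_cons_drop a hi, List.eraseIdx_eq_take_drop_succ]
  exact List.perm_middle

theorem ms_set (l : List Int) (i : Nat) (a : Int) (hi : i < l.length) :
    ((l.set i a : List Int) : Multiset Int) = a ::ₘ (l.eraseIdx i : List Int) := by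
  rw [Multiset.cons_coe, Multiset.coe_eq_coe]
  exact set_perm l i a hi

theorem ms_self (l : List Int) (i : Nat) (hi : i < l.length) :
    (l : Multiset Int) = gD l i ::ₘ (l.eraseIdx i : List Int) := by
  have := ms_set l i (gD l i) hi
  rwa [show l.set i (gD l i) = l by
    simp [gD, List.getD, List.getElem?_eq_getElem hi, List.set_getElem_self]] at this

theorem gD_set_self (l : List Int) (i : Nat) (a : Int) (hi : i < l.length) :
    gD (l.set i a) i = a := by
  simp [gD, List.getD_eq_getElem, hi]

theorem gD_set_ne (l : List Int) (i j : Nat) (a : Int) (hij : i ≠ j) :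
    gD (l.set i a) j = gD l j := by
  simp [gD, List.getD, List.getElem?_set_ne hij]

theorem set_set_perm (h : List Int) (pos pp : Nat) (ni : Int)
    (hpos : pos < h.length) (hpp : pp < h.length) (hne : pp ≠ pos) :
    ((h.set pos (gD h pp)).set pp ni).Perm (h.set pos ni) := by
  rw [← Multiset.coe_eq_coe]
  rw [ms_set _ pp ni (by simpa using hpp), ms_set _ pos ni hpos]
  have h1 : ((h.set pos (gD h pp) : List Int) : Multiset Int) = gD (h.set pos (gD h pp)) pp ::ₘ ((h.set pos (gD h pp)).eraseIdx pp : List Int) := ms_self _ pp (by simpa using hpp)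
  rw [gD_set_ne h pos pp _ (fun e => hne e.symm)] at h1
  have h2 : ((h.set pos (gD h pp) : List Int) : Multiset Int) = gD h pp ::ₘ ((h.eraseIdx pos : List Int) : Multiset Int) := ms_set h pos (gD h pp) hpos
  have h3 : ((h : List Int) : Multiset Int) = gD h pos ::ₘ ((h.eraseIdx pos : List Int) : Multiset Int) := ms_self h pos hpos
  have : ((h.set pos (gD h pp)).eraseIdx pp : List Int) = ((h.eraseIdx pos : List Int) : Multiset Int) := by
    have := h1.symm.trans h2
    exact (Multiset.cons_inj_right _).1 (h1.symm.trans h2)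
  rw [this]

def IsHeap (h : List Int) : Prop :=
  ∀ j : Nat, 0 < j → j < h.length → gD h ((j - 1) / 2) ≤ gD h j

theorem parent_lt (j : Nat) (hj : 0 < j) : (j - 1) / 2 < j :=
  Nat.lt_of_le_of_lt (Nat.div_le_self _ _) (by omega)

theorem bubbleUp (pos : Nat) (h : List Int) (ni : Int) (hpos : pos < h.length)
    (I1 : ∀ j, 0 < j → j < h.length → j ≠ pos → (j - 1) / 2 ≠ pos → gD h ((j - 1) / 2) ≤ gD h j)
    (I2 : ∀ j, 0 < j → j < h.length → (j - 1) / 2 = pos → ni ≤ gD h j)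
    (I4 : ∀ j, 0 < j → j < h.length → (j - 1) / 2 = pos → 0 < pos → gD h ((pos - 1) / 2) ≤ gD h j) :
    IsHeap (siftdownLoop h ni 0 pos) ∧ (siftdownLoop h ni 0 pos).Perm (h.set pos ni) := by
  induction pos using Nat.strong_induction_on generalizing h with
  | _ pos IH =>
  rw [siftdownLoop]
  by_cases hp : 0 < pos
  · simp only [dif_pos hp]
    set pp := (pos - 1) / 2 with hppdef
    have hpplt : pp < pos := parent_lt pos hp
    have hpplen : pp < h.length := lt_trans hpplt hpos
    by_cases hlt : ni < h.getD pp 0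
    · simp only [if_pos hlt]
      have hlen' : pp < (h.set pos (h.getD pp 0)).length := by simpa using hpplen
      have hgd : ∀ j, j ≠ pos → gD (h.set pos (h.getD pp 0)) j = gD h j := by
        intro j hj; exact gD_set_ne h pos j _ (fun e => hj e.symm)
      have hgdpos : gD (h.set pos (h.getD pp 0)) pos = gD h pp :=
        gD_set_self h pos _ hpos
      have main := IH pp hpplt (h.set pos (h.getD pp 0)) hlen'
        (by -- I1'
          intro j hj0 hjlen hjne hjpne
          rw [List.length_set] at hjlen
          have hjpos : j ≠ pos := fun e => hjpne (by rw [e])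
          rw [hgd j hjpos]
          by_cases hpj : (j - 1) / 2 = pos
          · rw [hpj, hgdpos]
            exact I4 j hj0 hjlen hpj hp
          · rw [hgd _ hpj]
            exact I1 j hj0 hjlen hjpos hpj)
        (by -- I2'
          intro j hj0 hjlen hjp
          rw [List.length_set] at hjlen
          by_cases hjpos : j = pos
          · subst hjpos; rw [hgdpos]; exact le_of_lt hlt
          · rw [hgd j hjpos]
            have h5 : gD h ((j-1)/2) ≤ gD h j := I1 j hj0 hjlen hjpos (by rw [hjp]; omega)
            rw [hjp] at h5
            exact le_trans (le_of_lt hlt) h5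
          )
        (by -- I4'
          intro j hj0 hjlen hjp hpp0
          rw [List.length_set] at hjlen
          have hppp : (pp - 1) / 2 < pp := parent_lt pp hpp0
          have h1 : gD h ((pp - 1) / 2) ≤ gD h pp :=
            I1 pp hpp0 hpplen (by omega) (by omega)
          rw [hgd ((pp - 1) / 2) (by omega)]
          by_cases hjpos : j = pos
          · subst hjpos; rw [hgdpos]; exact h1
          · rw [hgd j hjpos]
            have h2 : gD h ((j-1)/2) ≤ gD h j := I1 j hj0 hjlen hjpos (by rw [hjp]; omega)
            rw [hjp] at h2
            exact le_trans h1 h2)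
      refine ⟨main.1, main.2.trans ?_⟩
      exact set_set_perm h pos pp ni hpos hpplen (by omega)
    · simp only [if_neg hlt]
      push_neg at hlt
      constructor
      · intro j hj0 hjlen
        rw [List.length_set] at hjlen
        by_cases hjpos : j = pos
        · subst hjpos
          rw [gD_set_self h j ni hjlen, gD_set_ne h j _ ni (by have := parent_lt j hj0; omega)]
          exact hlt
        · rw [gD_set_ne h pos j ni (fun e => hjpos e.symm)]
          by_cases hpj : (j - 1) / 2 = pos
          · rw [hpj, gD_set_self h pos ni hpos]
            exact I2 j hj0 hjlen hpj
          · rw [gD_set_ne h pos _ ni (fun e => hpj e.symm)]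
            exact I1 j hj0 hjlen hjpos hpj
      · exact List.Perm.refl _
  · simp only [dif_neg hp]
    have hpos0 : pos = 0 := by omega
    subst hpos0
    constructor
    · intro j hj0 hjlen
      rw [List.length_set] at hjlen
      rw [gD_set_ne h 0 j ni (by omega)]
      by_cases hpj : (j - 1) / 2 = 0
      · rw [hpj, gD_set_self h 0 ni hpos]
        exact I2 j hj0 hjlen hpj
      · rw [gD_set_ne h 0 _ ni (fun e => hpj e.symm)]
        exact I1 j hj0 hjlen (by omega) hpj
    · exact List.Perm.refl _

theorem gD_eq (h : List Int) (i : Nat) (hi : i < h.length) : gD h i = h[i] := by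
  simp [gD, List.getD, List.getElem?_eq_getElem hi]

theorem gD_append_left (h : List Int) (t : List Int) (i : Nat) (hi : i < h.length) :
    gD (h ++ t) i = gD h i := by
  rw [gD_eq _ _ (by simp; omega), gD_eq _ _ hi]
  exact List.getElem_append_left hi

def sChild (h : List Int) (pos endpos : Nat) : Nat :=
  if 2 * pos + 1 + 1 < endpos ∧ ¬ (h.getD (2 * pos + 1) 0 < h.getD (2 * pos + 1 + 1) 0)
  then 2 * pos + 1 + 1 else 2 * pos + 1

theorem siftupLoop_eq_stop (h : List Int) (pos endpos : Nat) (hc : ¬ 2 * pos + 1 < endpos) :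
    siftupLoop h pos endpos = (h, pos) := by
  rw [siftupLoop]; simp [hc]

theorem siftupLoop_eq_step (h : List Int) (pos endpos : Nat) (hc : 2 * pos + 1 < endpos) :
    siftupLoop h pos endpos
      = siftupLoop (h.set pos (h.getD (sChild h pos endpos) 0)) (sChild h pos endpos) endpos := by
  rw [siftupLoop]; simp only [dif_pos hc]; rfl

theorem siftupDown (fuel : Nat) (x : List Int) (pos : Nat) (hfuel : x.length - pos ≤ fuel)
    (hpos : pos < x.length)
    (J1 : ∀ j, 0 < j → j < x.length → j ≠ pos → (j - 1) / 2 ≠ pos → gD x ((j - 1) / 2) ≤ gD x j)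
    (J2 : ∀ j, 0 < j → j < x.length → (j - 1) / 2 = pos → 0 < pos → gD x ((pos - 1) / 2) ≤ gD x j) :
    (siftupLoop x pos x.length).1.length = x.length ∧
    (siftupLoop x pos x.length).2 < x.length ∧
    ¬ (2 * (siftupLoop x pos x.length).2 + 1 < x.length) ∧
    (∀ j, 0 < j → j < x.length → j ≠ (siftupLoop x pos x.length).2 → (j - 1) / 2 ≠ (siftupLoop x pos x.length).2 →
      gD (siftupLoop x pos x.length).1 ((j - 1) / 2) ≤ gD (siftupLoop x pos x.length).1 j) ∧
    (∀ ni : Int, (((siftupLoop x pos x.length).1.set (siftupLoop x pos x.length).2 ni : List Int) : Multiset Int)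
      = ((x.set pos ni : List Int) : Multiset Int)) := by
  induction fuel generalizing x pos with
  | zero =>
    have hc : ¬ (2 * pos + 1 < x.length) := by omega
    rw [siftupLoop_eq_stop x pos x.length hc]
    exact ⟨rfl, hpos, hc, J1, fun ni => rfl⟩
  | succ fuel IH =>
    by_cases hc : 2 * pos + 1 < x.length
    · rw [siftupLoop_eq_step x pos x.length hc]
      set cp := sChild x pos x.length with hcpdef
      have hcplt : cp < x.length := by rw [hcpdef]; unfold sChild; split <;> omega
      have hposcp : pos < cp := by rw [hcpdef]; unfold sChild; split <;> omega
      have hcppar : (cp - 1) / 2 = pos := by rw [hcpdef]; unfold sChild; split <;> omega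
      set x' := x.set pos (x.getD cp 0) with hx'def
      have hxlen : x'.length = x.length := by simp [hx'def]
      have hgd : ∀ j, j ≠ pos → gD x' j = gD x j := by
        intro j hj; exact gD_set_ne x pos j _ (fun e => hj e.symm)
      have hgdpos : gD x' pos = gD x cp := gD_set_self x pos _ hpos
      have hchosen : ∀ j, 0 < j → j < x.length → (j - 1) / 2 = pos → j ≠ cp → gD x cp ≤ gD x j := by
        intro j hj0 hjlen hjp hjcp
        have hj2 : j = 2 * pos + 1 ∨ j = 2 * pos + 2 := by omega
        rw [hcpdef] at hjcp ⊢
        unfold sChild at hjcp ⊢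
        by_cases hcond : 2 * pos + 1 + 1 < x.length ∧ ¬ (x.getD (2 * pos + 1) 0 < x.getD (2 * pos + 1 + 1) 0)
        · rw [if_pos hcond] at hjcp ⊢
          have hj1 : j = 2 * pos + 1 := by omega
          subst hj1
          exact le_of_not_gt hcond.2
        · rw [if_neg hcond] at hjcp ⊢
          have hj1 : j = 2 * pos + 2 := by omega
          subst hj1
          rcases Decidable.not_and_iff_not_or_not.1 hcond with hh | hh
          · omega
          · exact le_of_lt (Decidable.of_not_not hh)
      have main := IH x' cp (by omega) (by omega)
        (by
          intro j hj0 hjlen hjne hjpne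
          rw [hxlen] at hjlen
          by_cases hjpos : j = pos
          · subst hjpos
            have hpj : (j - 1) / 2 < j := parent_lt j hj0
            rw [hgd _ (by omega), hgdpos]
            exact J2 cp (by omega) hcplt hcppar hj0
          · rw [hgd j hjpos]
            by_cases hpj : (j - 1) / 2 = pos
            · rw [hpj, hgdpos]
              exact hchosen j hj0 hjlen hpj hjne
            · rw [hgd _ hpj]
              exact J1 j hj0 hjlen hjpos hpj)
        (by
          intro j hj0 hjlen hjp _
          rw [hxlen] at hjlen
          rw [hcppar, hgdpos]
          have hjpos : j ≠ pos := by omega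
          rw [hgd j hjpos]
          have h5 : gD x ((j - 1) / 2) ≤ gD x j := J1 j hj0 hjlen hjpos (by omega)
          rwa [hjp] at h5)
      rw [hxlen] at main
      refine ⟨main.1, main.2.1, main.2.2.1, main.2.2.2.1, ?_⟩
      intro ni
      rw [main.2.2.2.2 ni]
      exact Multiset.coe_eq_coe.2 (set_set_perm x pos cp ni hpos hcplt (by omega))
    · rw [siftupLoop_eq_stop x pos x.length hc]
      exact ⟨rfl, hpos, hc, J1, fun ni => rfl⟩

theorem siftup_spec (x : List Int) (hne : 0 < x.length)
    (J1 : ∀ j, 0 < j → j < x.length → (j - 1) / 2 ≠ 0 → gD x ((j - 1) / 2) ≤ gD x j) :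
    IsHeap (siftup x 0) ∧ (siftup x 0).Perm x := by
  obtain ⟨hlen1, hr2, hleaf, hJ1, hms⟩ := siftupDown x.length x 0 (by omega) hne
    (fun j hj0 hjlen hjne hjpne => J1 j hj0 hjlen hjpne)
    (fun j _ _ _ h0 => absurd h0 (by omega))
  have hs : siftup x 0 = siftdown ((siftupLoop x 0 x.length).1.set (siftupLoop x 0 x.length).2 (x.getD 0 0)) 0 (siftupLoop x 0 x.length).2 := rfl
  rw [hs]
  generalize hgen : siftupLoop x 0 x.length = r at hlen1 hr2 hleaf hJ1 hms ⊢
  have hni : gD (r.1.set r.2 (x.getD 0 0)) r.2 = x.getD 0 0 :=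
    gD_set_self r.1 r.2 _ (by omega)
  have hbu := bubbleUp r.2 (r.1.set r.2 (x.getD 0 0)) (x.getD 0 0)
    (by rw [List.length_set]; omega)
    (by intro j hj0 hjlen hjne hjpne
        rw [List.length_set] at hjlen
        rw [gD_set_ne _ _ _ _ (fun e => hjne e.symm), gD_set_ne _ _ _ _ (fun e => hjpne e.symm)]
        exact hJ1 j hj0 (by omega) hjne hjpne)
    (by intro j hj0 hjlen hjp
        rw [List.length_set] at hjlen
        omega)
    (by intro j hj0 hjlen hjp _
        rw [List.length_set] at hjlen
        omega)
  have hsd : siftdown (r.1.set r.2 (x.getD 0 0)) 0 r.2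
      = siftdownLoop (r.1.set r.2 (x.getD 0 0)) (x.getD 0 0) 0 r.2 := by
    have hni' : (r.1.set r.2 (x.getD 0 0)).getD r.2 0 = x.getD 0 0 := hni
    unfold siftdown; rw [hni']
  rw [hsd]
  refine ⟨hbu.1, hbu.2.trans ?_⟩
  rw [List.set_set]
  rw [← Multiset.coe_eq_coe, hms]
  have hx0 : x.set 0 (x.getD 0 0) = x := by
    simp [List.getD, List.getElem?_eq_getElem hne, List.set_getElem_self]
  rw [hx0]

theorem heappush_spec (h : List Int) (x : Int) (hh : IsHeap h) :
    IsHeap (heappush h x) ∧ (heappush h x).Perm (x :: h) := by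
  have hgx : (h ++ [x]).getD h.length 0 = x := by
    simp [List.getD]
  have hlen : (h ++ [x]).length = h.length + 1 := by simp
  have hbu := bubbleUp h.length (h ++ [x]) x (by simp)
    (by intro j hj0 hjlen hjne hjpne
        rw [hlen] at hjlen
        have hjlt : j < h.length := by omega
        have hpjlt : (j - 1) / 2 < h.length := by omega
        rw [gD_append_left h [x] j hjlt, gD_append_left h [x] _ hpjlt]
        exact hh j hj0 hjlt)
    (by intro j hj0 hjlen hjp
        rw [hlen] at hjlen
        omega)
    (by intro j hj0 hjlen hjp _
        rw [hlen] at hjlen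
        omega)
  have hpush : heappush h x = siftdownLoop (h ++ [x]) x 0 h.length := by
    unfold heappush siftdown
    rw [hgx]
  rw [hpush]
  refine ⟨hbu.1, hbu.2.trans ?_⟩
  have : (h ++ [x]).set h.length x = h ++ [x] := by
    rw [List.set_eq_take_cons_drop x (by simp)]
    simp
  rw [this]
  exact List.perm_append_singleton x h

theorem gD_dropLast (l : List Int) (i : Nat) (hi : i < l.length - 1) :
    gD l.dropLast i = gD l i := by
  rw [gD_eq _ _ (by simp; omega), gD_eq _ _ (by omega)]
  simp [List.getElem_dropLast]

theorem self_perm_head_erase (l : List Int) (hl : 0 < l.length) :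
    l.Perm (gD l 0 :: l.eraseIdx 0) := by
  have := set_perm l 0 (gD l 0) hl
  rwa [show l.set 0 (gD l 0) = l by
    simp [gD, List.getD, List.getElem?_eq_getElem hl, List.set_getElem_self]] at this

theorem heappop_spec (h : List Int) (hh : IsHeap h) (hne : h ≠ []) :
    IsHeap (heappop h).2 ∧ ((heappop h).1 :: (heappop h).2).Perm h ∧ (heappop h).1 = gD h 0 := by
  have hlast : h.getLast? = some (h.getLast hne) := List.getLast?_eq_some_getLast hne
  have hsplit : h.dropLast ++ [h.getLast hne] = h := List.dropLast_append_getLast hne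
  have hpop : heappop h =
      (if h.dropLast.isEmpty then (h.getLast hne, h.dropLast)
       else (h.dropLast.getD 0 0, siftup (h.dropLast.set 0 (h.getLast hne)) 0)) := by
    unfold heappop
    rw [hlast]
  generalize hg : h.getLast hne = a at hsplit hpop
  by_cases hrest : h.dropLast.isEmpty
  · rw [hpop, if_pos hrest]
    have hd : h.dropLast = [] := List.isEmpty_iff.1 hrest
    have hh1 : (a :: ([] : List Int)) = h := by
      rw [← hsplit, hd]; rfl
    refine ⟨?_, ?_, ?_⟩
    · intro j hj0 hjlen
      rw [hd] at hjlen
      simp at hjlen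
    · show (a :: h.dropLast).Perm h
      rw [hd, hh1]
    · show a = gD h 0
      rw [← hh1]
      rfl
  · rw [hpop, if_neg hrest]
    have hdne : h.dropLast ≠ [] := fun e => hrest (by simp [e])
    have hdlen : 0 < h.dropLast.length := List.length_pos_iff.2 hdne
    have hJ1 : ∀ j, 0 < j → j < (h.dropLast.set 0 a).length → (j - 1) / 2 ≠ 0 →
        gD (h.dropLast.set 0 a) ((j - 1) / 2) ≤ gD (h.dropLast.set 0 a) j := by
      intro j hj0 hjlen hjp
      rw [List.length_set] at hjlen
      have hpj : (j - 1) / 2 < j := parent_lt j hj0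
      rw [gD_set_ne _ _ _ _ (by omega), gD_set_ne _ _ _ _ (by omega)]
      have hhl : h.dropLast.length = h.length - 1 := by simp
      rw [gD_dropLast h j (by omega), gD_dropLast h _ (by omega)]
      exact hh j hj0 (by omega)
    have hhl : h.dropLast.length = h.length - 1 := by simp
    have hsu := siftup_spec (h.dropLast.set 0 a) (by rw [List.length_set]; omega) hJ1
    refine ⟨hsu.1, ?_, ?_⟩
    · refine (List.Perm.cons _ hsu.2).trans ?_
      have e1 : (h.dropLast.set 0 a).Perm (a :: h.dropLast.eraseIdx 0) :=
        set_perm h.dropLast 0 a hdlen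
      have e2 : h.dropLast.Perm (gD h.dropLast 0 :: h.dropLast.eraseIdx 0) :=
        self_perm_head_erase h.dropLast hdlen
      refine (List.Perm.cons _ e1).trans ?_
      refine (List.Perm.swap _ _ _).trans ?_
      refine (List.Perm.cons _ ((e2 : h.dropLast.Perm (h.dropLast.getD 0 0 :: h.dropLast.eraseIdx 0)).symm)).trans ?_
      refine ((List.perm_append_singleton _ _).symm).trans ?_
      rw [hsplit]
    · show gD h.dropLast 0 = gD h 0
      exact gD_dropLast h 0 (by omega)

theorem gD_zero_le (h : List Int) (hh : IsHeap h) (i : Nat) (hi : i < h.length) :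
    gD h 0 ≤ gD h i := by
  induction i using Nat.strong_induction_on with
  | _ i IH =>
  rcases Nat.eq_zero_or_pos i with h0 | h0
  · subst h0; exact le_refl _
  · have hpj : (i - 1) / 2 < i := parent_lt i h0
    exact le_trans (IH _ hpj (by omega)) (hh i h0 hi)

theorem isHeap_head_le (h : List Int) (hh : IsHeap h) (x : Int) (hx : x ∈ h) :
    gD h 0 ≤ x := by
  obtain ⟨i, hi, rfl⟩ := List.getElem_of_mem hx
  rw [← gD_eq h i hi]
  exact gD_zero_le h hh i hi

def dCost (works : List Int) (L : Int) : Int := (works.map (fun w => max (w - L) 0)).sum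
def gCnt (works : List Int) (L : Int) : Nat := works.countP (fun w => decide (L ≤ w))

def lk (works : List Int) (L0 : Int) : Nat → Int × Nat
  | 0 => (L0, 0)
  | j + 1 =>
    let p := lk works L0 j
    if p.2 + 1 < gCnt works p.1 then (p.1, p.2 + 1) else (p.1 - 1, 0)

def posState (works : List Int) (L : Int) (k : Nat) : List Int :=
  List.replicate (gCnt works L - k) L ++ List.replicate k (L - 1)
    ++ works.filter (fun w => decide (w < L))

def negState (works : List Int) (L : Int) (k : Nat) : List Int :=
  (posState works L k).map (fun w => -w)

def sumsq (l : List Int) : Int := (l.map (fun w => w * w)).sum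

theorem dCost_sub_one (works : List Int) (L : Int) :
    dCost works (L - 1) = dCost works L + (gCnt works L : Int) := by
  induction works with
  | nil => simp [dCost, gCnt]
  | cons a t IH =>
    simp only [dCost, gCnt, List.map_cons, List.sum_cons, List.countP_cons] at *
    by_cases ha : L ≤ a
    · simp only [ha, decide_true, if_pos]
      push_cast
      rw [show max (a - (L - 1)) 0 = max (a - L) 0 + 1 by omega]
      omega
    · simp only [ha, decide_false, Bool.false_eq_true, if_false]
      rw [show max (a - (L - 1)) 0 = max (a - L) 0 by omega]
      omega

theorem dCost_antitone (works : List Int) {L L' : Int} (hLL : L ≤ L') :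
    dCost works L' ≤ dCost works L := by
  induction works with
  | nil => simp [dCost]
  | cons a t IH =>
    simp only [dCost, List.map_cons, List.sum_cons] at *
    have : max (a - L') 0 ≤ max (a - L) 0 := by omega
    omega

theorem dCost_zero (works : List Int) (L0 : Int) (hmax : ∀ w ∈ works, w ≤ L0) :
    dCost works L0 = 0 := by
  induction works with
  | nil => simp [dCost]
  | cons a t IH =>
    simp only [dCost, List.map_cons, List.sum_cons] at *
    rw [show max (a - L0) 0 = 0 by have := hmax a (by simp); omega]
    rw [IH (fun w hw => hmax w (by simp [hw]))]
    simp

theorem gCnt_pos (works : List Int) (L0 : Int) (hmem : L0 ∈ works) :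
    0 < gCnt works L0 :=
  List.countP_pos_iff.2 ⟨L0, hmem, by simp⟩

theorem lk_inv (works : List Int) (L0 : Int)
    (hmax : ∀ w ∈ works, w ≤ L0) (hmem : L0 ∈ works) (j : Nat) :
    dCost works (lk works L0 j).1 + ((lk works L0 j).2 : Int) = (j : Int) ∧
      (lk works L0 j).2 < gCnt works (lk works L0 j).1 := by
  induction j with
  | zero =>
    simp only [lk]
    exact ⟨by rw [dCost_zero works L0 hmax]; simp, gCnt_pos works L0 hmem⟩
  | succ j IH =>
    rw [lk]
    by_cases hc : (lk works L0 j).2 + 1 < gCnt works (lk works L0 j).1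
    · simp only [if_pos hc]
      refine ⟨?_, hc⟩
      push_cast
      omega
    · simp only [if_neg hc]
      have hkg : (lk works L0 j).2 + 1 = gCnt works (lk works L0 j).1 := by omega
      constructor
      · rw [dCost_sub_one]
        push_cast
        omega
      · have : gCnt works ((lk works L0 j).1 - 1) ≥ gCnt works (lk works L0 j).1 := by
          apply List.countP_mono_left
          intro w _ hw
          simp only [decide_eq_true_eq] at *
          omega
        omega

theorem lk_unique (works : List Int) (L0 : Int) (hmax : ∀ w ∈ works, w ≤ L0) (hmem : L0 ∈ works)
    (j : Nat) (L : Int) (k : Int)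
    (h1 : dCost works L + k = (j : Int)) (h2 : 0 ≤ k) (h3 : k < (gCnt works L : Int)) :
    L = (lk works L0 j).1 ∧ k = ((lk works L0 j).2 : Int) := by
  obtain ⟨e1, e2⟩ := lk_inv works L0 hmax hmem j
  set L1 := (lk works L0 j).1
  set k1 := (lk works L0 j).2
  have hD1 : dCost works (L - 1) = dCost works L + (gCnt works L : Int) := dCost_sub_one works L
  have hD2 : dCost works (L1 - 1) = dCost works L1 + (gCnt works L1 : Int) := dCost_sub_one works L1
  have hLL : L = L1 := by
    by_contra hne
    rcases lt_or_gt_of_ne hne with hlt | hlt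
    · have : dCost works (L1 - 1) ≤ dCost works L := dCost_antitone works (by omega)
      omega
    · have : dCost works (L - 1) ≤ dCost works L1 := dCost_antitone works (by omega)
      omega
  subst hLL
  exact ⟨rfl, by omega⟩

theorem replicate_of_all_eq (l : List Int) (v : Int) (h : ∀ w ∈ l, w = v) :
    l = List.replicate l.length v := by
  apply List.eq_replicate_of_mem
  exact h

theorem filter_ge_max (works : List Int) (L0 : Int) (hmax : ∀ w ∈ works, w ≤ L0) :
    works.filter (fun w => decide (L0 ≤ w)) = List.replicate (gCnt works L0) L0 := by
  have hlen : (works.filter (fun w => decide (L0 ≤ w))).length = gCnt works L0 := by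
    simp [gCnt, List.countP_eq_length_filter]
  rw [← hlen]
  apply replicate_of_all_eq
  intro w hw
  have := List.mem_filter.1 hw
  have h1 := hmax w this.1
  have h2 : L0 ≤ w := by simpa using this.2
  omega

theorem posState_zero_perm (works : List Int) (L0 : Int)
    (hmax : ∀ w ∈ works, w ≤ L0) (hmem : L0 ∈ works) :
    (posState works L0 0).Perm works := by
  unfold posState
  simp only [Nat.sub_zero, List.replicate_zero, List.append_nil]
  rw [← filter_ge_max works L0 hmax]
  have := List.filter_append_perm (fun w => decide (L0 ≤ w)) works
  refine List.Perm.trans ?_ this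
  apply List.Perm.append_left
  apply List.Perm.of_eq
  apply List.filter_congr
  intro w _
  by_cases h : L0 ≤ w
  · simp [h, not_lt.2 h]
  · simp [h, lt_of_not_ge h]

theorem cnt_split (works : List Int) (L : Int) :
    gCnt works (L - 1) = gCnt works L + works.countP (fun w => decide (w = L - 1)) := by
  induction works with
  | nil => simp [gCnt]
  | cons a t IH =>
    simp only [gCnt, List.countP_cons] at *
    by_cases h1 : L ≤ a <;> by_cases h2 : a = L - 1
    · omega
    · rw [if_pos (show decide (L - 1 ≤ a) = true by simp only [decide_eq_true_eq]; omega),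
        if_pos (show decide (L ≤ a) = true by simp only [decide_eq_true_eq]; omega),
        if_neg (show ¬ decide (a = L - 1) = true by simp only [decide_eq_true_eq]; omega)]
      omega
    · rw [if_pos (show decide (L - 1 ≤ a) = true by simp only [decide_eq_true_eq]; omega),
        if_neg (show ¬ decide (L ≤ a) = true by simp only [decide_eq_true_eq]; omega),
        if_pos (show decide (a = L - 1) = true by simp only [decide_eq_true_eq]; omega)]
      omega
    · rw [if_neg (show ¬ decide (L - 1 ≤ a) = true by simp only [decide_eq_true_eq]; omega),
        if_neg (show ¬ decide (L ≤ a) = true by simp only [decide_eq_true_eq]; omega),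
        if_neg (show ¬ decide (a = L - 1) = true by simp only [decide_eq_true_eq]; omega)]
      omega

theorem filter_lt_split (works : List Int) (L : Int) :
    (works.filter (fun w => decide (w < L))).Perm
      (List.replicate (works.countP (fun w => decide (w = L - 1))) (L - 1)
        ++ works.filter (fun w => decide (w < L - 1))) := by
  induction works with
  | nil => simp
  | cons a t IH =>
    by_cases h1 : a < L
    · by_cases h2 : a = L - 1
      · subst h2
        rw [List.filter_cons_of_pos (by simp only [decide_eq_true_eq]; omega),
          List.filter_cons_of_neg (by simp only [decide_eq_true_eq, Bool.not_eq_eq_eq_not, Bool.not_true, decide_eq_false_iff_not]; omega),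
          show List.countP (fun w => decide (w = L - 1)) ((L-1) :: t)
            = List.countP (fun w => decide (w = L - 1)) t + 1 by
            rw [List.countP_cons]; simp,
          List.replicate_succ, List.cons_append]
        exact List.Perm.cons _ IH
      · have h3 : a < L - 1 := by omega
        rw [List.filter_cons_of_pos (by simp [h1]),
          List.filter_cons_of_pos (by simp [h3]),
          show List.countP (fun w => decide (w = L - 1)) (a :: t)
            = List.countP (fun w => decide (w = L - 1)) t by
            rw [List.countP_cons]; simp [h2]]
        exact (List.Perm.cons _ IH).trans (List.perm_middle).symm
    · rw [List.filter_cons_of_neg (by simp [h1]),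
        List.filter_cons_of_neg (by simp only [decide_eq_true_eq, Bool.not_eq_eq_eq_not, Bool.not_true, decide_eq_false_iff_not]; omega),
        show List.countP (fun w => decide (w = L - 1)) (a :: t)
          = List.countP (fun w => decide (w = L - 1)) t by
          rw [List.countP_cons]; simp only [decide_eq_true_eq]; rw [if_neg (by omega)]; omega]
      exact IH

theorem posState_step_perm (works : List Int) (L : Int) (k : Nat)
    (hk : k < gCnt works L) :
    ((L - 1) :: (posState works L k).erase L).Perm
      (posState works (if k + 1 < gCnt works L then L else L - 1)
        (if k + 1 < gCnt works L then k + 1 else 0)) := by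
  have hrep : List.replicate (gCnt works L - k) L = L :: List.replicate (gCnt works L - k - 1) L := by
    rw [← List.replicate_succ]; congr 1; omega
  have herase : (posState works L k).erase L
      = List.replicate (gCnt works L - k - 1) L ++ List.replicate k (L - 1)
        ++ works.filter (fun w => decide (w < L)) := by
    unfold posState
    rw [hrep, List.cons_append, List.cons_append, List.erase_cons_head]
  rw [herase]
  by_cases hc : k + 1 < gCnt works L
  · simp only [if_pos hc]
    unfold posState
    rw [show gCnt works L - (k + 1) = gCnt works L - k - 1 by omega, List.replicate_succ]
    rw [List.append_assoc, List.append_assoc, List.cons_append]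
    exact (List.perm_middle).symm
  · simp only [if_neg hc]
    have hkg : k + 1 = gCnt works L := by omega
    unfold posState
    rw [show gCnt works L - k - 1 = 0 by omega]
    simp only [List.replicate_zero, List.nil_append, Nat.sub_zero, List.append_nil]
    rw [← List.cons_append, ← List.replicate_succ, hkg]
    rw [cnt_split works L, List.replicate_add, List.append_assoc]
    exact List.Perm.append_left _ (filter_lt_split works L)

theorem buildHeap (l : List Int) (h0 : List Int) (hh : IsHeap h0) :
    IsHeap (l.foldl (fun h w => heappush h (-w)) h0) ∧
      (l.foldl (fun h w => heappush h (-w)) h0).Perm (h0 ++ l.map (fun w => -w)) := by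
  induction l generalizing h0 with
  | nil => exact ⟨hh, by simpa using List.Perm.refl h0⟩
  | cons a t IH =>
    simp only [List.foldl_cons, List.map_cons]
    obtain ⟨hp1, hp2⟩ := heappush_spec h0 (-a) hh
    obtain ⟨q1, q2⟩ := IH (heappush h0 (-a)) hp1
    refine ⟨q1, q2.trans ?_⟩
    refine (List.Perm.append_right _ hp2).trans ?_
    rw [List.cons_append]
    exact (List.perm_middle).symm

theorem mem_posState_le (works : List Int) (L : Int) (k : Nat) (x : Int)
    (hx : x ∈ posState works L k) : x ≤ L := by
  unfold posState at hx
  rcases List.mem_append.1 hx with hx | hx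
  · rcases List.mem_append.1 hx with hx | hx
    · rw [List.eq_of_mem_replicate hx]
    · rw [List.eq_of_mem_replicate hx]; omega
  · have := List.mem_filter.1 hx
    have : x < L := by simpa using this.2
    omega

theorem mem_posState_self (works : List Int) (L : Int) (k : Nat) (hk : k < gCnt works L) :
    L ∈ posState works L k := by
  unfold posState
  apply List.mem_append.2
  left
  apply List.mem_append.2
  left
  exact List.mem_replicate.2 ⟨by omega, rfl⟩

theorem aLoop_inv (works : List Int) (L0 : Int)
    (hmax : ∀ w ∈ works, w ≤ L0) (hmem : L0 ∈ works) (j : Nat) :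
    IsHeap (Nat.iterate (fun h => heappush (heappop h).2 ((heappop h).1 + 1)) j
        (works.foldl (fun h work => heappush h (-work)) [])) ∧
      (Nat.iterate (fun h => heappush (heappop h).2 ((heappop h).1 + 1)) j
        (works.foldl (fun h work => heappush h (-work)) [])).Perm
        (negState works (lk works L0 j).1 (lk works L0 j).2) := by
  induction j with
  | zero =>
    obtain ⟨b1, b2⟩ := buildHeap works [] (by intro j hj0 hjlen; simp at hjlen)
    refine ⟨b1, ?_⟩
    simp only [Function.iterate_zero, id_eq]
    refine b2.trans ?_
    simp only [List.nil_append, lk, negState]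
    exact (List.Perm.map _ (posState_zero_perm works L0 hmax hmem)).symm
  | succ j IH =>
    obtain ⟨IH1, IH2⟩ := IH
    obtain ⟨e1, e2⟩ := lk_inv works L0 hmax hmem j
    set S := Nat.iterate (fun h => heappush (heappop h).2 ((heappop h).1 + 1)) j
        (works.foldl (fun h work => heappush h (-work)) []) with hS
    rw [Function.iterate_succ_apply', ← hS]
    set L := (lk works L0 j).1
    set k := (lk works L0 j).2
    have hSne : S ≠ [] := by
      intro e
      have hlen := IH2.length_eq
      rw [e] at hlen
      simp only [List.length_nil, negState, List.length_map] at hlen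
      unfold posState at hlen
      simp only [List.length_append, List.length_replicate] at hlen
      omega
    obtain ⟨p1, p2, p3⟩ := heappop_spec S IH1 hSne
    -- the popped element is -L
    have hmemL : -L ∈ S := by
      rw [IH2.mem_iff]
      exact List.mem_map.2 ⟨L, mem_posState_self works L k e2, rfl⟩
    have hple : gD S 0 ≤ -L := isHeap_head_le S IH1 (-L) hmemL
    have hpmem : (heappop S).1 ∈ S := p2.mem_iff.1 (by simp)
    have hpge : -L ≤ (heappop S).1 := by
      have := IH2.mem_iff.1 hpmem
      obtain ⟨w, hw, he⟩ := List.mem_map.1 this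
      have := mem_posState_le works L k w hw
      omega
    have hpeq : (heappop S).1 = -L := by
      rw [p3] at *
      omega
    obtain ⟨u1, u2⟩ := heappush_spec (heappop S).2 ((heappop S).1 + 1) p1
    refine ⟨u1, u2.trans ?_⟩
    rw [hpeq]
    -- (heappop S).2 ~ (negState L k).erase (-L)
    have hrest : (heappop S).2.Perm ((negState works L k).erase (-L)) := by
      have h1 : ((heappop S).1 :: (heappop S).2).Perm (negState works L k) := p2.trans IH2
      rw [hpeq] at h1
      have := h1.erase (-L)
      rwa [List.erase_cons_head] at this
    refine (List.Perm.cons _ hrest).trans ?_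
    -- (-L+1) :: (negState L k).erase (-L) ~ negState (next)
    have hkey := posState_step_perm works L k e2
    have hneg := List.Perm.map (fun w : Int => -w) hkey
    have hlk : lk works L0 (j+1) = if k + 1 < gCnt works L then (L, k + 1) else (L - 1, 0) := rfl
    have hmapE : ((posState works L k).erase L).map (fun w : Int => -w)
        = (negState works L k).erase (-L) := by
      unfold negState
      rw [List.map_erase neg_injective]
    rw [List.map_cons, hmapE] at hneg
    have : (-(L - 1) : Int) = -L + 1 := by ring
    rw [this] at hneg
    rw [hlk, apply_ite Prod.fst, apply_ite Prod.snd]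
    exact hneg

theorem foldl_const_iterate (step : List Int → List Int) (l : List Int) (init : List Int) :
    l.foldl (fun h _ => step h) init = Nat.iterate step l.length init := by
  induction l generalizing init with
  | nil => rfl
  | cons a t IH =>
    simp only [List.foldl_cons, List.length_cons]
    rw [IH (step init), Function.iterate_succ_apply]

theorem foldl_sq_eq_sumsq (l : List Int) (s : Int) :
    l.foldl (fun a num => a + num ^ 2) s = s + sumsq l := by
  induction l generalizing s with
  | nil => simp [sumsq]
  | cons a t IH =>
    simp only [List.foldl_cons, sumsq, List.map_cons, List.sum_cons] at *
    rw [IH]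
    ring

theorem sumsq_perm {l l' : List Int} (h : l.Perm l') : sumsq l = sumsq l' :=
  List.Perm.sum_eq (List.Perm.map _ h)

theorem sumsq_neg (l : List Int) : sumsq (l.map (fun w => -w)) = sumsq l := by
  unfold sumsq
  rw [List.map_map]
  congr 1
  apply List.map_congr_left
  intro a _
  simp only [Function.comp_apply]
  ring

theorem sumsq_append (l1 l2 : List Int) : sumsq (l1 ++ l2) = sumsq l1 + sumsq l2 := by
  unfold sumsq
  rw [List.map_append, List.sum_append]

theorem sumsq_replicate (m : Nat) (v : Int) : sumsq (List.replicate m v) = (m : Int) * (v * v) := by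
  unfold sumsq
  rw [List.map_replicate, List.sum_replicate, nsmul_eq_mul]

theorem sumsq_posState (works : List Int) (L : Int) (k : Nat) (hk : k ≤ gCnt works L) :
    sumsq (posState works L k) =
      ((gCnt works L : Int) - (k : Int)) * (L * L) + (k : Int) * ((L - 1) * (L - 1))
        + sumsq (works.filter (fun w => decide (w < L))) := by
  unfold posState
  rw [sumsq_append, sumsq_append, sumsq_replicate, sumsq_replicate]
  have : ((gCnt works L - k : Nat) : Int) = (gCnt works L : Int) - (k : Int) := by
    push_cast [hk]
    ring
  rw [this]

theorem bScan_inv (ws : List Int) (n : Int) (fuel : Nat) (cum : Int) (c : Nat)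
    (hfuel : ws.length - c ≤ fuel)
    (hc1 : 1 ≤ c) (hc2 : c ≤ ws.length)
    (hcum : cum = (ws.take c).sum)
    (hprev : c = 1 ∨ cum - (c : Int) * gD ws (c - 1) ≤ n) :
    (1 ≤ (bScan ws n cum c).2 ∧ (bScan ws n cum c).2 ≤ ws.length) ∧
      (bScan ws n cum c).1 = (ws.take (bScan ws n cum c).2).sum ∧
      ((bScan ws n cum c).2 = 1 ∨
        (bScan ws n cum c).1 - ((bScan ws n cum c).2 : Int) * gD ws ((bScan ws n cum c).2 - 1) ≤ n) ∧
      ((bScan ws n cum c).2 = ws.length ∨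
        (bScan ws n cum c).1 - ((bScan ws n cum c).2 : Int) * gD ws (bScan ws n cum c).2 > n) := by
  induction fuel generalizing cum c with
  | zero =>
    have hstop : ¬ (c < ws.length ∧ cum - (c : Int) * ws.getD c 0 ≤ n) := by
      intro hcl
      omega
    rw [bScan, dif_neg hstop]
    exact ⟨⟨hc1, hc2⟩, hcum, hprev, Or.inl (by omega)⟩
  | succ fuel IH =>
    by_cases hcl : c < ws.length ∧ cum - (c : Int) * ws.getD c 0 ≤ n
    · rw [bScan, dif_pos hcl]
      have htake : (ws.take (c + 1)).sum = (ws.take c).sum + ws.getD c 0 := by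
        rw [List.take_succ]
        rw [List.sum_append]
        congr 1
        rw [List.getElem?_eq_getElem hcl.1]
        simp [List.getD, List.getElem?_eq_getElem hcl.1]
      refine IH (cum + ws.getD c 0) (c + 1) (by omega) (by omega) (by omega) (by rw [htake, ← hcum]) ?_
      right
      have : gD ws (c + 1 - 1) = ws.getD c 0 := rfl
      rw [this]
      have : cum + ws.getD c 0 - ((c : Int) + 1) * ws.getD c 0 = cum - (c : Int) * ws.getD c 0 := by
        ring
      push_cast
      rw [this]
      exact hcl.2
    · rw [bScan, dif_neg hcl]
      refine ⟨⟨hc1, hc2⟩, hcum, hprev, ?_⟩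
      by_cases hce : c = ws.length
      · exact Or.inl hce
      · right
        rcases Decidable.not_and_iff_not_or_not.1 hcl with hh | hh
        · omega
        · have := lt_of_not_ge hh
          simpa [gD] using this

theorem sum_sub_const (l : List Int) (L : Int) :
    (l.map (fun w => w - L)).sum = l.sum - (l.length : Int) * L := by
  induction l with
  | nil => simp
  | cons a t IH =>
    simp only [List.map_cons, List.sum_cons, List.length_cons, IH]
    push_cast
    ring

theorem bMain (works : List Int) (n : Int) (hn : 1 ≤ n) (hne : works ≠ []) :
    ∀ cum : Int, ∀ c : Nat, ∀ L : Int,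
    (cum, c) = bScan (PySem.List.sorted works (fun x => x) true) n (gD (PySem.List.sorted works (fun x => x) true) 0) 1 →
    L = -(PySem.Int.floordiv (cum - n) (-(c : Int))) →
    dCost works L = cum - (c : Int) * L ∧
    (gCnt works L : Int) = (c : Int) ∧
    cum - (c : Int) * L ≤ n ∧
    n < cum - (c : Int) * (L - 1) ∧
    ((PySem.List.sorted works (fun x => x) true).drop c).Perm
      (works.filter (fun w => decide (w < L))) := by
  intro cum c L hscan hL
  set ws := PySem.List.sorted works (fun x => x) true with hws
  have hperm : ws.Perm works := PySem.List.sorted_perm ..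
  have hpw : ws.Pairwise (fun a b => b ≤ a) := PySem.List.sorted_pairwise_rev ..
  have hwlen : ws.length = works.length := hperm.length_eq
  have hlen0 : 0 < ws.length := by
    rw [hwlen]
    exact List.length_pos_iff.2 hne
  have htake1 : gD ws 0 = (ws.take 1).sum := by
    obtain ⟨w0, t, he⟩ := List.exists_cons_of_ne_nil (List.length_pos_iff.1 hlen0)
    rw [he]
    simp [gD]
  obtain ⟨⟨hc1, hc2⟩, hcum, hprev, hbreak⟩ :=
    bScan_inv ws n ws.length (gD ws 0) 1 (by omega) (by omega) (by omega) htake1 (Or.inl rfl)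
  rw [← hscan] at hc1 hc2 hcum hprev hbreak
  simp only [] at hc1 hc2 hcum hprev hbreak
  have hcpos : (0 : Int) < (c : Int) := by exact_mod_cast hc1
  have hfd : PySem.Int.floordiv (cum - n) (-(c : Int)) = PySem.Int.floordiv (-(cum - n)) (c : Int) := by
    rw [← PySem.Int.floordiv_neg_neg]
    ring_nf
  have hLb : (L - 1) * (c : Int) < cum - n ∧ cum - n ≤ L * (c : Int) := by
    refine (PySem.Int.neg_floordiv_neg_eq_iff_of_pos hcpos).1 ?_
    rw [← hfd, hL]
  -- bounds on elements
  have hmono : ∀ i j : Nat, i < j → j < ws.length → gD ws j ≤ gD ws i := by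
    intro i j hij hj
    have := List.pairwise_iff_getElem.1 hpw i j (by omega) hj hij
    rw [gD_eq ws j hj, gD_eq ws i (by omega)]
    exact this
  have hLle : L ≤ gD ws (c - 1) := by
    rcases hprev with hc1' | hple
    · subst hc1'
      have h1 := hLb.1
      simp only [Nat.cast_one, mul_one] at h1
      have hg : gD ws (1 - 1) = cum := by
        rw [show (1 - 1 : Nat) = 0 from rfl, htake1, hcum]
      omega
    · have : cum - n ≤ (c : Int) * gD ws (c - 1) := by omega
      nlinarith [hLb.1]
  have hupper : ∀ i : Nat, i < c → L ≤ gD ws i := by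
    intro i hi
    have hilen : i < ws.length := by omega
    rcases Nat.eq_or_lt_of_le (Nat.le_of_lt_succ (by omega : i < (c - 1) + 1)) with he | hlt
    · rw [he] at *
      exact hLle
    · exact le_trans hLle (hmono i (c - 1) hlt (by omega))
  have hlower : ∀ i : Nat, c ≤ i → (hi : i < ws.length) → ws[i] < L := by
    intro i hci hi
    rcases hbreak with hcl | hgt
    · omega
    · have hclen : c < ws.length := by omega
      have h1 : (c : Int) * gD ws c < cum - n := by omega
      have h2 : gD ws c < L := by nlinarith [hLb.2]
      rw [← gD_eq ws i hi]
      rcases Nat.eq_or_lt_of_le hci with he | hlt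
      · rw [← he]
        exact h2
      · have h3 := hmono c i hlt hi
        omega
  have hsplit : ws = ws.take c ++ ws.drop c := (List.take_append_drop c ws).symm
  have htlen : (ws.take c).length = c := by
    rw [List.length_take]
    omega
  have hmemtake : ∀ w ∈ ws.take c, L ≤ w := by
    intro w hw
    obtain ⟨i, hi, he⟩ := List.mem_iff_getElem.1 hw
    rw [List.getElem_take] at he
    rw [← he]
    have := hupper i (by omega)
    rwa [gD_eq ws i (by omega)] at this
  have hmemdrop : ∀ w ∈ ws.drop c, w < L := by
    intro w hw
    obtain ⟨i, hi, he⟩ := List.mem_iff_getElem.1 hw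
    rw [List.getElem_drop] at he
    rw [← he]
    exact hlower (c + i) (by omega) (by rw [List.length_drop] at hi; omega)
  have hdperm : dCost works L = dCost ws L := by
    unfold dCost
    exact (List.Perm.sum_eq ((hperm.map _))).symm
  refine ⟨?_, ?_, ?_, ?_, ?_⟩
  · -- dCost = cum - c*L
    rw [hdperm]
    unfold dCost
    conv_lhs => rw [hsplit]
    rw [List.map_append, List.sum_append]
    have e1 : (ws.take c).map (fun w => max (w - L) 0) = (ws.take c).map (fun w => w - L) := by
      apply List.map_congr_left
      intro w hw
      have := hmemtake w hw
      omega
    have e2 : (ws.drop c).map (fun w => max (w - L) 0) = (ws.drop c).map (fun _ => (0 : Int)) := by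
      apply List.map_congr_left
      intro w hw
      have := hmemdrop w hw
      omega
    rw [e1, e2, sum_sub_const, htlen, hcum]
    simp
  · -- gCnt = c
    unfold gCnt
    rw [← hperm.countP_eq]
    conv_lhs => rw [hsplit]
    rw [List.countP_append]
    have e1 : (ws.take c).countP (fun w => decide (L ≤ w)) = (ws.take c).length := by
      apply List.countP_eq_length.2
      intro w hw
      simpa using hmemtake w hw
    have e2 : (ws.drop c).countP (fun w => decide (L ≤ w)) = 0 := by
      apply List.countP_eq_zero.2
      intro w hw
      have := hmemdrop w hw
      simp
      omega
    rw [e1, e2, htlen]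
    simp
  · linarith [hLb.2, mul_comm L (c : Int)]
  · linarith [hLb.1, mul_comm (L - 1) (c : Int)]
  · -- drop ~ filter
    have e0 : ws.filter (fun w => decide (w < L)) = ws.drop c := by
      conv_lhs => rw [hsplit]
      rw [List.filter_append]
      have e1 : (ws.take c).filter (fun w => decide (w < L)) = [] := by
        apply List.filter_eq_nil_iff.2
        intro w hw
        have := hmemtake w hw
        simp
        omega
      have e2 : (ws.drop c).filter (fun w => decide (w < L)) = ws.drop c := by
        apply List.filter_eq_self.2
        intro w hw
        simpa using hmemdrop w hw
      rw [e1, e2, List.nil_append]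
    rw [← e0]
    exact hperm.filter _

theorem solution_eq_alt (n : Int) (works : List Int) : solution n works = solution_alt n works := by
  by_cases h1 : n ≥ works.sum
  · simp only [solution, solution_alt, if_pos h1]
  · by_cases h2 : n ≤ 0
    · have hA : solution n works
          = (works.foldl (fun h work => heappush h (-work)) []).foldl (fun a num => a + num ^ 2) 0 := by
        simp only [solution, if_neg h1, PySem.List.pyRange_one_eq_nil h2, List.foldl_nil]
      have hB : solution_alt n works = (works.map (fun w => w * w)).sum := by
        simp only [solution_alt, if_neg h1, if_pos h2]
      rw [hA, hB]
      obtain ⟨b1, b2⟩ := buildHeap works [] (by intro j hj0 hjlen; simp at hjlen)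
      rw [foldl_sq_eq_sumsq, zero_add, sumsq_perm b2, List.nil_append, sumsq_neg]
      rfl
    · have hn1 : 1 ≤ n := by omega
      have hne : works ≠ [] := by
        intro e
        rw [e] at h1
        simp at h1
        omega
      set ws := PySem.List.sorted works (fun x => x) true with hws
      have hperm : ws.Perm works := PySem.List.sorted_perm ..
      have hwsne : ws ≠ [] := by
        intro e
        have := hperm.length_eq
        rw [e] at this
        simp at this
        exact hne (List.length_eq_zero_iff.1 this.symm)
      obtain ⟨m, t, hmt⟩ := List.exists_cons_of_ne_nil hwsne
      have hgd0 : gD ws 0 = m := by rw [hmt]; rfl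
      have hmax : ∀ w ∈ works, w ≤ gD ws 0 := by
        intro w hw
        rw [hgd0]
        exact PySem.List.key_head_sorted_rev_ge works (fun x => x) hmt w hw
      have hmem : gD ws 0 ∈ works := by
        rw [← hperm.mem_iff, hgd0, hmt]
        exact List.mem_cons_self
      set p := bScan ws n (gD ws 0) 1 with hp
      set cum := p.1 with hcum
      set c := p.2 with hc
      set L := -(PySem.Int.floordiv (cum - n) (-(c : Int))) with hLdef
      obtain ⟨F1, F2, F3, F4, F5⟩ := bMain works n hn1 hne cum c L (Prod.mk.eta.trans hp) hLdef
      set kB := n - (cum - (c : Int) * L) with hkB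
      set j := n.toNat with hj
      have hjn : (j : Int) = n := Int.toNat_of_nonneg (by omega)
      obtain ⟨hLeq, hkeq⟩ := lk_unique works (gD ws 0) hmax hmem j L kB
        (by rw [F1, hjn]; ring) (by omega) (by
          rw [F2]
          have h5 : (c : Int) * (L - 1) = (c : Int) * L - (c : Int) := by ring
          linarith [F4])
      obtain ⟨inv1, inv2⟩ := lk_inv works (gD ws 0) hmax hmem j
      obtain ⟨A1, A2⟩ := aLoop_inv works (gD ws 0) hmax hmem j
      have hA : solution n works
          = ((PySem.List.pyRange 0 n 1).foldl
              (fun h _ => heappush (heappop h).2 ((heappop h).1 + 1))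
              (works.foldl (fun h work => heappush h (-work)) [])).foldl
              (fun a num => a + num ^ 2) 0 := by
        simp only [solution, if_neg h1]
      rw [hA, foldl_const_iterate, PySem.List.length_pyRange_one, sub_zero]
      rw [foldl_sq_eq_sumsq, zero_add]
      rw [sumsq_perm A2]
      have hns : sumsq (negState works (lk works (gD ws 0) j).1 (lk works (gD ws 0) j).2)
          = sumsq (posState works (lk works (gD ws 0) j).1 (lk works (gD ws 0) j).2) :=
        sumsq_neg _
      rw [hns, sumsq_posState works _ _ (le_of_lt inv2)]
      have hB : solution_alt n works
          = sumsq (ws.drop c) + kB * (L - 1) ^ 2 + ((c : Int) - kB) * L * L := by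
        simp only [solution_alt, if_neg h1, if_neg h2]
        rfl
      rw [hB, sumsq_perm F5]
      rw [← hLeq, ← hkeq, F2]
      ring


-- ===== VERDICT (by name: the statement is the Claim_ definition above) =====
theorem solution_spec : Claim_equal_solution := by
  intro n works _
  unfold Spec_solution
  exact solution_eq_alt n works
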